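-- pv_equiv track=rewrite | github.com/arccoxx/topoKEMP | topoKEMP2/invariants.py | _compute_circle_factor
-- ===== SOURCE A (Python) =====
-- from typing import Dict, List, Optional, Tuple
--
-- def _compute_circle_factor(n: int) -> Dict[int, int]:
--     """Compute (-A^2 - A^{-2})^{n-1}."""
--     if n <= 1:
--         return {0: 1}
--
--     base = {2: -1, -2: -1}
--     result = {0: 1}
--
--     for _ in range(n - 1):
--         result = _multiply_polynomials(result, base)
--
--     return result
--
-- def _multiply_polynomials(p1: Dict[int, int], p2: Dict[int, int]) -> Dict[int, int]:
--     """Multiply two polynomials."""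
--     result = {}
--     for k1, v1 in p1.items():
--         for k2, v2 in p2.items():
--             k = k1 + k2
--             result[k] = result.get(k, 0) + v1 * v2
--     result = {k: v for k, v in result.items() if v != 0}
--     return result if result else {0: 0}
-- ===== SOURCE B (Python) =====
-- def _compute_circle_factor(n: int):
--     """Compute (-A^2 - A^{-2})^{n-1} directly by the binomial theorem (O(n))."""
--     if n <= 1:
--         return {0: 1}
--     m = n - 1
--     sign = -1 if m % 2 else 1
--     out = {}
--     c = 1  # running binomial coefficient C(m, k)
--     for k in range(m + 1):
--         out[2 * m - 4 * k] = sign * c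
--         c = c * (m - k) // (k + 1)
--     return out
-- ===== Notes on version B (the rewrite author's own statement) =====
-- stated objective: faster
-- what changed: Replaces the n-1 iterated polynomial multiplications with the binomial theorem: one pass emitting coefficient (-1)^(n-1)*C(n-1,k) at exponent 2(n-1)-4k, maintaining C(n-1,k) incrementally.
import Mathlib
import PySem

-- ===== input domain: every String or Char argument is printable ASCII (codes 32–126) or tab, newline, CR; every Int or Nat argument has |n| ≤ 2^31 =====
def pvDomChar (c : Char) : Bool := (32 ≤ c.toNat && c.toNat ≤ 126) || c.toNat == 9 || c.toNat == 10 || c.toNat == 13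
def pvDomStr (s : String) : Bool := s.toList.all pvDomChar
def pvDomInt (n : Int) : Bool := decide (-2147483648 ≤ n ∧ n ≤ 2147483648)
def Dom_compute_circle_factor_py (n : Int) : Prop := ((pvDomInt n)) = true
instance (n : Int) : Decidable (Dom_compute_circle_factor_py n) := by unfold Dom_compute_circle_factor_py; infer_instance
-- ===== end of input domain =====

-- B replaces the n-1 iterated polynomial multiplications by a single binomial-theorem pass
-- with an incrementally maintained binomial coefficient (objective: faster).

-- ===== PORT A =====
-- port of _multiply_polynomials (dicts as PySem.Dict; the dict comprehension is filter + rebuild)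
def pvMultiplyPolys (p1 p2 : PySem.Dict Int Int) : PySem.Dict Int Int :=
  let result := p1.items.foldl (fun r kv1 =>
    p2.items.foldl (fun r kv2 =>
      r.insert (kv1.1 + kv2.1) (r.getD (kv1.1 + kv2.1) 0 + kv1.2 * kv2.2)) r) PySem.Dict.empty
  let result2 := (result.items.filter (fun kv => kv.2 != 0)).foldl
      (fun d kv => d.insert kv.1 kv.2) PySem.Dict.empty
  if result2.items.isEmpty then PySem.Dict.ofList [(0, 0)] else result2

def compute_circle_factor_py (n : Int) : List (Int × Int) :=
  if n ≤ 1 then [(0, 1)] else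
    let base := PySem.Dict.ofList [((2 : Int), (-1 : Int)), (-2, -1)]
    let result := (PySem.List.pyRange 0 (n - 1) 1).foldl
      (fun r _ => pvMultiplyPolys r base) (PySem.Dict.ofList [(0, 1)])
    result.items

-- ===== PORT B =====
def compute_circle_factor_py_alt (n : Int) : List (Int × Int) :=
  if n ≤ 1 then [(0, 1)] else
    let m := n - 1
    let sign : Int := if PySem.Int.mod m 2 ≠ 0 then -1 else 1
    ((PySem.List.pyRange 0 (m + 1) 1).foldl
      (fun (st : PySem.Dict Int Int × Int) k =>
        (st.1.insert (2 * m - 4 * k) (sign * st.2),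
         PySem.Int.floordiv (st.2 * (m - k)) (k + 1)))
      (PySem.Dict.empty, 1)).1.items

-- ===== PRECONDITION & SPEC =====
def Spec_compute_circle_factor_py (n : Int) (out : List (Int × Int)) : Prop := out = compute_circle_factor_py_alt n
instance (n : Int) (out : List (Int × Int)) : Decidable (Spec_compute_circle_factor_py n out) := by unfold Spec_compute_circle_factor_py; infer_instance

-- ===== CLAIM (what is proved, stated in full; the proofs are below) =====
def Claim_equal_compute_circle_factor_py : Prop := ∀ (n : Int), Dom_compute_circle_factor_py n → Spec_compute_circle_factor_py n (compute_circle_factor_py n)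

-- ===== LEMMAS AND PROOFS =====

-- the coefficient (-1)^i * C(i,s) of A^(2i-4s) in (-A^2 - A^-2)^i
def pvCC (i s : Nat) : Int := (-1 : Int) ^ i * (Nat.choose i s : Int)

def pvBinom (i : Nat) : List (Int × Int) :=
  (List.range (i + 1)).map (fun s : Nat => (2 * (i : Int) - 4 * (s : Int), pvCC i s))

def pvKey (i s : Nat) : Int := 2 * (i : Int) + 2 - 4 * (s : Int)

-- value at key pvKey i s after j outer steps of _multiply_polynomials (pvBinom i) base
def pvVal (i j s : Nat) : Int :=
  -((if s = 0 then 0 else pvCC i (s - 1)) + (if s < j then pvCC i s else 0))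

def pvInter (i j : Nat) : List (Int × Int) :=
  (List.range (j + 1)).map (fun s : Nat => (pvKey i s, pvVal i j s))

def pvBase : PySem.Dict Int Int := PySem.Dict.ofList [((2 : Int), (-1 : Int)), (-2, -1)]

-- the body of A's outer loop, with base's two items unrolled
def pvStepA (r : PySem.Dict Int Int) (kv : Int × Int) : PySem.Dict Int Int :=
  let r1 := r.insert (kv.1 + 2) (r.getD (kv.1 + 2) 0 + kv.2 * (-1))
  r1.insert (kv.1 + (-2)) (r1.getD (kv.1 + (-2)) 0 + kv.2 * (-1))

-- the body of B's loop
def pvStepB (sign : Int) (m : Int) (st : PySem.Dict Int Int × Int) (k : Int) :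
    PySem.Dict Int Int × Int :=
  (st.1.insert (2 * m - 4 * k) (sign * st.2),
   PySem.Int.floordiv (st.2 * (m - k)) (k + 1))

-- generic facts about a dict given by an explicit items list
lemma pv_contains_false (L : List (Int × Int)) (k : Int) (h : k ∉ L.map Prod.fst) :
    (PySem.Dict.mk L).contains k = false := by
  rw [← Bool.not_eq_true, PySem.Dict.contains_iff_mem_keys, PySem.Dict.keys_mk]
  exact h

lemma pv_insert_fresh (L : List (Int × Int)) (k v : Int) (h : k ∉ L.map Prod.fst) :
    (PySem.Dict.mk L).insert k v = PySem.Dict.mk (L ++ [(k, v)]) := by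
  apply PySem.Dict.ext
  rw [PySem.Dict.items_insert_of_not_contains _ _ (pv_contains_false L k h)]

lemma pv_insert_last (L : List (Int × Int)) (k vold v : Int) (h : k ∉ L.map Prod.fst) :
    (PySem.Dict.mk (L ++ [(k, vold)])).insert k v = PySem.Dict.mk (L ++ [(k, v)]) := by
  apply PySem.Dict.ext
  have hc : (PySem.Dict.mk (L ++ [(k, vold)])).contains k = true := by
    rw [PySem.Dict.contains_iff_mem_keys, PySem.Dict.keys_mk]
    simp
  rw [PySem.Dict.items_insert_of_contains _ _ hc]
  show List.map _ (L ++ [(k, vold)]) = _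
  rw [List.map_append]
  congr 1
  · rw [show L = List.map id L by simp]
    rw [List.map_map]
    apply List.map_congr_left
    intro p hp
    simp only [id] at hp ⊢
    have : p.1 ≠ k := fun he => h (he ▸ List.mem_map_of_mem hp)
    simp [this]
  · simp

lemma pv_getD_last (L : List (Int × Int)) (k v : Int) (h : k ∉ L.map Prod.fst) :
    (PySem.Dict.mk (L ++ [(k, v)])).getD k 0 = v := by
  induction L with
  | nil => simp [PySem.Dict.getD_eq_get?_getD, PySem.Dict.get?_mk_cons]
  | cons a L ih =>
    have ha : a.1 ≠ k := by simp at h; exact fun he => absurd he.symm h.1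
    have h' : k ∉ L.map Prod.fst := by simp at h ⊢; exact h.2
    have := ih h'
    rw [PySem.Dict.getD_eq_get?_getD] at this ⊢
    show ((PySem.Dict.mk ((a.1, a.2) :: (L ++ [(k, v)]))).get? k).getD 0 = v
    rw [PySem.Dict.get?_mk_cons]
    simp [ha, this]

lemma pv_key_notmem (i j t : Nat) (f : Nat → Int) (h : j ≤ t) :
    pvKey i t ∉ (List.map (fun s : Nat => (pvKey i s, f s)) (List.range j)).map Prod.fst := by
  rw [List.map_map]
  simp only [List.mem_map, List.mem_range, Function.comp]
  rintro ⟨s, hs, he⟩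
  simp only [pvKey] at he
  omega

lemma pv_inter_split (i j : Nat) :
    pvInter i j = (List.range j).map (fun s : Nat => (pvKey i s, pvVal i j s))
      ++ [(pvKey i j, pvVal i j j)] := by
  rw [pvInter, List.range_succ, List.map_append]; rfl

-- one outer step of A on the intermediate dict (j ≥ 1 outer steps already done)
lemma pv_stepA (i j : Nat) (hj : 1 ≤ j) :
    pvStepA (PySem.Dict.mk (pvInter i j)) (2 * (i : Int) - 4 * (j : Int), pvCC i j)
      = PySem.Dict.mk (pvInter i (j + 1)) := by
  have hLL : (List.range j).map (fun s : Nat => (pvKey i s, pvVal i j s))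
      = (List.range j).map (fun s : Nat => (pvKey i s, pvVal i (j+1) s)) := by
    apply List.map_congr_left
    intro s hs
    rw [List.mem_range] at hs
    simp [pvVal, hs, Nat.lt_succ_of_lt hs]
  have hk1 : 2 * (i : Int) - 4 * (j : Int) + 2 = pvKey i j := by simp only [pvKey]; ring
  have hk2 : 2 * (i : Int) - 4 * (j : Int) + (-2) = pvKey i (j + 1) := by
    simp only [pvKey]; push_cast; ring
  have hnm := pv_key_notmem i j j (pvVal i (j+1)) (le_refl j)
  have hv1 : pvVal i j j + pvCC i j * (-1) = pvVal i (j+1) j := by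
    have hj0 : j ≠ 0 := by omega
    simp [pvVal, hj0]
    ring
  simp only [pvStepA]
  rw [pv_inter_split i j, hLL, hk1, hk2]
  rw [pv_getD_last _ _ _ hnm, pv_insert_last _ _ _ _ hnm, hv1]
  have h2 : (List.range j).map (fun s : Nat => (pvKey i s, pvVal i (j+1) s)) ++ [(pvKey i j, pvVal i (j+1) j)]
      = (List.range (j+1)).map (fun s : Nat => (pvKey i s, pvVal i (j+1) s)) := by
    rw [List.range_succ, List.map_append]; rfl
  rw [h2]
  have hnm2 := pv_key_notmem i (j+1) (j+1) (pvVal i (j+1)) (le_refl (j+1))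
  rw [PySem.Dict.getD_of_not_contains _ _ (pv_contains_false _ _ hnm2)]
  rw [pv_insert_fresh _ _ _ hnm2]
  have hv2 : (0 : Int) + pvCC i j * (-1) = pvVal i (j+1) (j+1) := by
    simp [pvVal]
  rw [hv2, pv_inter_split i (j+1)]

lemma pv_stepA_base (i : Nat) :
    pvStepA PySem.Dict.empty (2 * (i : Int) - 4 * ((0 : Nat) : Int), pvCC i 0)
      = PySem.Dict.mk (pvInter i 1) := by
  have he : (PySem.Dict.empty : PySem.Dict Int Int) = PySem.Dict.mk [] := rfl
  have hk1 : 2 * (i : Int) - 4 * ((0 : Nat) : Int) + 2 = pvKey i 0 := by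
    simp only [pvKey]; push_cast; ring
  have hk2 : 2 * (i : Int) - 4 * ((0 : Nat) : Int) + (-2) = pvKey i 1 := by
    simp only [pvKey]; push_cast; ring
  simp only [pvStepA, he, hk1, hk2]
  rw [pv_insert_fresh [] _ _ (by simp)]
  have hg0 : (PySem.Dict.mk ([] : List (Int × Int))).getD (pvKey i 0) 0 = 0 := rfl
  rw [hg0]
  simp only [List.nil_append]
  have hnm : pvKey i 1 ∉ ([((pvKey i 0), (0 : Int) + pvCC i 0 * (-1))].map Prod.fst) := by
    intro hm; simp only [List.map, List.mem_singleton, pvKey] at hm; omega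
  rw [PySem.Dict.getD_of_not_contains _ _ (pv_contains_false _ _ hnm)]
  rw [pv_insert_fresh _ _ _ hnm]
  have : pvInter i 1 = [(pvKey i 0, pvVal i 1 0), (pvKey i 1, pvVal i 1 1)] := rfl
  rw [this]
  have h0 : (0 : Int) + pvCC i 0 * (-1) = pvVal i 1 0 := by simp [pvVal]
  rw [h0]
  simp [pvVal]

lemma pv_outerA (i j : Nat) :
    ((List.range (j + 1)).map (fun s : Nat => (2 * (i : Int) - 4 * (s : Int), pvCC i s))).foldl
        pvStepA PySem.Dict.empty = PySem.Dict.mk (pvInter i (j + 1)) := by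
  induction j with
  | zero => simpa using pv_stepA_base i
  | succ j ih =>
    rw [List.range_succ, List.map_append, List.foldl_append, ih]
    simpa using pv_stepA i (j + 1) (by omega)

lemma pv_inter_last (i : Nat) : pvInter i (i + 1) = pvBinom (i + 1) := by
  apply List.map_congr_left
  intro s hs
  rw [List.mem_range] at hs
  rw [Prod.mk.injEq]
  constructor
  · simp only [pvKey]; push_cast; ring
  · show pvVal i (i+1) s = pvCC (i+1) s
    rcases s with _ | t
    · simp [pvVal, pvCC]
      rw [pow_succ]; ring
    · have hch : Nat.choose (i+1) (t+1) = Nat.choose i t + Nat.choose i (t+1) :=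
        Nat.choose_succ_succ i t
      by_cases hlt : t + 1 < i + 1
      · simp only [pvVal, pvCC, if_neg (Nat.succ_ne_zero t), if_pos hlt, Nat.add_sub_cancel]
        rw [hch]; push_cast; ring
      · have hz : Nat.choose i (t+1) = 0 := by rw [Nat.choose_eq_zero_iff]; omega
        simp only [pvVal, pvCC, if_neg (Nat.succ_ne_zero t), if_neg hlt, Nat.add_sub_cancel]
        rw [hch, hz]; push_cast; ring

lemma pv_binom_keys_nodup (i : Nat) : ((pvBinom i).map Prod.fst).Nodup := by
  rw [pvBinom, List.map_map]
  refine List.Nodup.map ?_ (List.nodup_range)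
  intro a b hab
  simp only [Function.comp] at hab
  omega

lemma pv_binom_vals_ne (i : Nat) : ∀ kv ∈ pvBinom i, kv.2 ≠ 0 := by
  intro kv hkv
  rw [pvBinom, List.mem_map] at hkv
  obtain ⟨s, hs, rfl⟩ := hkv
  rw [List.mem_range] at hs
  show pvCC i s ≠ 0
  have : 0 < Nat.choose i s := Nat.choose_pos (by omega)
  simp only [pvCC]
  intro h
  rcases mul_eq_zero.mp h with h1 | h1
  · exact absurd h1 (by positivity)
  · omega

lemma pv_filter (i : Nat) : (pvBinom i).filter (fun kv => kv.2 != 0) = pvBinom i := by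
  apply List.filter_eq_self.mpr
  intro a ha
  simpa using pv_binom_vals_ne i a ha

lemma pv_multiply (i : Nat) (d : PySem.Dict Int Int) (hd : d.items = pvBinom i) :
    (pvMultiplyPolys d pvBase).items = pvBinom (i + 1) := by
  have hfun : (fun (r : PySem.Dict Int Int) (kv1 : Int × Int) =>
      pvBase.items.foldl (fun r kv2 =>
        r.insert (kv1.1 + kv2.1) (r.getD (kv1.1 + kv2.1) 0 + kv1.2 * kv2.2)) r) = pvStepA := by
    funext r kv
    show List.foldl _ r [((2 : Int), (-1 : Int)), (-2, -1)] = _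
    simp only [List.foldl, pvStepA]
  have hres : (d.items.foldl (fun r kv1 =>
      pvBase.items.foldl (fun r kv2 =>
        r.insert (kv1.1 + kv2.1) (r.getD (kv1.1 + kv2.1) 0 + kv1.2 * kv2.2)) r)
      PySem.Dict.empty).items = pvBinom (i + 1) := by
    rw [hfun, hd, pvBinom, pv_outerA i i, pv_inter_last i]
  show ((if _ then _ else _ : PySem.Dict Int Int)).items = _
  rw [hres, pv_filter (i + 1)]
  have hfresh : ∀ a ∈ pvBinom (i + 1),
      (PySem.Dict.empty : PySem.Dict Int Int).contains (Prod.fst a) = false := by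
    intro a _; exact PySem.Dict.contains_empty _
  have h2 := PySem.Dict.items_foldl_insert_fresh (pvBinom (i + 1)) Prod.fst Prod.snd
      PySem.Dict.empty hfresh (pv_binom_keys_nodup (i + 1))
  have h3 : (List.foldl (fun d (kv : Int × Int) => d.insert kv.1 kv.2) PySem.Dict.empty
      (pvBinom (i + 1))).items = pvBinom (i + 1) := by
    rw [h2]
    show ([] : List (Int × Int)) ++ _ = _
    simp
  rw [h3]
  have hne : (pvBinom (i + 1)).isEmpty = false := by
    simp [pvBinom, List.range_succ]
  rw [hne]
  simp only [Bool.false_eq_true, if_false]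
  exact h3

lemma pv_iterA (l : List Int) (d : PySem.Dict Int Int) (i : Nat) (hd : d.items = pvBinom i) :
    ((l.foldl (fun r _ => pvMultiplyPolys r pvBase) d)).items = pvBinom (i + l.length) := by
  induction l generalizing d i with
  | nil => simpa using hd
  | cons a l ih =>
    rw [List.foldl_cons]
    rw [ih (pvMultiplyPolys d pvBase) (i + 1) (pv_multiply i d hd)]
    congr 1
    simp
    omega

lemma pv_A_eq (n : Int) (h : ¬ n ≤ 1) :
    compute_circle_factor_py n = pvBinom (n - 1).toNat := by
  rw [compute_circle_factor_py, if_neg h]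
  have hn : (n - 1) = ((n - 1).toNat : Int) := by omega
  have hd0 : (PySem.Dict.ofList [((0 : Int), (1 : Int))]).items = pvBinom 0 := rfl
  show ((PySem.List.pyRange 0 (n - 1) 1).foldl
      (fun r _ => pvMultiplyPolys r (PySem.Dict.ofList [((2 : Int), (-1 : Int)), (-2, -1)]))
      (PySem.Dict.ofList [(0, 1)])).items = pvBinom (n - 1).toNat
  rw [show (PySem.Dict.ofList [((2 : Int), (-1 : Int)), (-2, -1)]) = pvBase from rfl]
  rw [hn, PySem.List.pyRange_zero_natCast]
  rw [pv_iterA _ _ 0 hd0]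
  simp

lemma pv_iterB (M : Nat) (sign : Int) (j : Nat) (hj : j ≤ M + 1) :
    ((List.range j).map (fun k : Nat => (k : Int))).foldl
        (pvStepB sign (M : Int)) (PySem.Dict.empty, 1)
      = (PySem.Dict.mk ((List.range j).map
            (fun s : Nat => (2 * (M : Int) - 4 * (s : Int), sign * (Nat.choose M s : Int)))),
         (Nat.choose M j : Int)) := by
  induction j with
  | zero => simp [PySem.Dict.empty]
  | succ j ih =>
    rw [List.range_succ, List.map_append, List.foldl_append]
    rw [ih (by omega)]
    simp only [List.map_cons, List.map_nil, List.foldl_cons, List.foldl_nil, pvStepB]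
    have hnm : 2 * (M : Int) - 4 * (j : Int) ∉
        ((List.range j).map (fun s : Nat => (2 * (M : Int) - 4 * (s : Int),
          sign * (Nat.choose M s : Int)))).map Prod.fst := by
      rw [List.map_map]
      simp only [List.mem_map, List.mem_range, Function.comp]
      rintro ⟨s, hs, he⟩
      omega
    rw [pv_insert_fresh _ _ _ hnm]
    rw [Prod.mk.injEq]
    constructor
    · rw [List.map_append]
      rfl
    · have hch : (Nat.choose M j : Int) * ((M : Int) - (j : Int))
          = (Nat.choose M (j + 1) : Int) * ((j : Int) + 1) := by
        have hcr := Nat.choose_succ_right_eq M j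
        have hsub : ((M - j : Nat) : Int) = (M : Int) - (j : Int) := by omega
        calc (Nat.choose M j : Int) * ((M : Int) - (j : Int))
            = ((Nat.choose M j * (M - j) : Nat) : Int) := by rw [← hsub]; push_cast; ring
          _ = ((Nat.choose M (j + 1) * (j + 1) : Nat) : Int) := by rw [← hcr]
          _ = (Nat.choose M (j + 1) : Int) * ((j : Int) + 1) := by push_cast; ring
      rw [hch, PySem.Int.floordiv_eq_ediv_of_pos (by omega)]
      exact Int.mul_ediv_cancel _ (by omega)

lemma pv_sign (M : Nat) :
    (if PySem.Int.mod ((M : Nat) : Int) 2 ≠ 0 then (-1 : Int) else 1) = (-1 : Int) ^ M := by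
  have hmod : PySem.Int.mod ((M : Nat) : Int) 2 = ((M % 2 : Nat) : Int) := by
    exact_mod_cast PySem.Int.mod_natCast M 2
  rw [hmod]
  rcases Nat.even_or_odd M with he | ho
  · have h2 : M % 2 = 0 := Nat.even_iff.mp he
    rw [h2, Even.neg_one_pow he]
    simp
  · have h2 : M % 2 = 1 := Nat.odd_iff.mp ho
    rw [h2, Odd.neg_one_pow ho]
    simp

lemma pv_B_eq (n : Int) (h : ¬ n ≤ 1) :
    compute_circle_factor_py_alt n = pvBinom (n - 1).toNat := by
  rw [compute_circle_factor_py_alt, if_neg h]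
  set M := (n - 1).toNat with hM
  have hm : n - 1 = (M : Int) := by omega
  simp only [hm]
  have hc : ((M : Int)) + 1 = (((M + 1 : Nat)) : Int) := by push_cast; ring
  rw [pv_sign M, hc, PySem.List.pyRange_zero_natCast]
  rw [show (fun (st : PySem.Dict Int Int × Int) (k : Int) =>
        (st.1.insert (2 * (M : Int) - 4 * k) ((-1 : Int) ^ M * st.2),
         PySem.Int.floordiv (st.2 * ((M : Int) - k)) (k + 1)))
      = pvStepB ((-1 : Int) ^ M) (M : Int) from rfl]
  rw [pv_iterB M ((-1 : Int) ^ M) (M + 1) (le_refl _)]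
  simp only [pvBinom, pvCC]

-- ===== VERDICT (by name: the statement is the Claim_ definition above) =====
theorem compute_circle_factor_py_spec : Claim_equal_compute_circle_factor_py := by
  intro n _
  unfold Spec_compute_circle_factor_py
  by_cases h : n ≤ 1
  · simp [compute_circle_factor_py, compute_circle_factor_py_alt, h]
  · rw [pv_A_eq n h, pv_B_eq n h]
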